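-- pv_equiv track=rewrite | github.com/mayflower/legacy-use | server/computer_use/handlers/utils/key_mapping_utils.py | normalize_key_part
-- ===== SOURCE A (Python) =====
-- from typing import Dict, Set
--
-- KEY_ALIASES: Dict[str, Set[str]] = {
--     # Navigation keys
--     'Escape': {'esc', 'escape'},
--     'Return': {'enter', 'return'},
--     'BackSpace': {'backspace', 'bksp'},
--     'Delete': {'del', 'delete'},
--     'Tab': {'tab'},
--     'space': {'space', 'spacebar'},
--     # Page navigation
--     'Page_Up': {'pageup', 'pgup'},
--     'Page_Down': {'pagedown', 'pgdn'},
--     'Home': {'home'},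
--     'End': {'end'},
--     # Arrow keys
--     'Up': {'up', 'uparrow'},
--     'Down': {'down', 'downarrow'},
--     'Left': {'left', 'leftarrow'},
--     'Right': {'right', 'rightarrow'},
--     # System keys
--     'Print': {'printscreen', 'prtsc', 'prtscrn'},
--     'Insert': {'ins', 'insert'},
--     'Pause': {'pause', 'pausebreak'},
--     'ScrollLock': {'scrolllock', 'scroll'},
--     'CapsLock': {'capslock', 'caps'},
--     'NumLock': {'numlock', 'num'},
--     # Modifier keys
--     'Super_L': {'win', 'windows', 'super', 'meta', 'cmd', 'super_l', 'super_r'},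
--     'ctrl': {'ctrl', 'control', 'ctrl_l', 'ctrl_r'},
--     'shift': {'shift', 'shift_l', 'shift_r'},
--     'alt': {'alt', 'alt_l', 'alt_r', 'option'},
-- }
--
-- def normalize_key_part(part: str) -> str:
--     """
--     Normalize a single key part.
--
--     Args:
--         part: Single key part to normalize
--
--     Returns:
--         Normalized key string
--     """
--     low = part.lower()
--
--     # Check key aliases - find canonical form for any alias
--     for canonical, aliases in KEY_ALIASES.items():
--         if low in aliases:
--             return canonical
--
--     # Function keys
--     if low.startswith('f') and low[1:].isdigit():
--         return f'F{int(low[1:])}'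
--
--     # Single letters or digits: keep as-is
--     if len(part) == 1:
--         return part
--
--     return part
-- ===== SOURCE B (Python) =====
-- from typing import Dict, Set
--
-- KEY_ALIASES: Dict[str, Set[str]] = {
--     'Escape': {'esc', 'escape'},
--     'Return': {'enter', 'return'},
--     'BackSpace': {'backspace', 'bksp'},
--     'Delete': {'del', 'delete'},
--     'Tab': {'tab'},
--     'space': {'space', 'spacebar'},
--     'Page_Up': {'pageup', 'pgup'},
--     'Page_Down': {'pagedown', 'pgdn'},
--     'Home': {'home'},
--     'End': {'end'},
--     'Up': {'up', 'uparrow'},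
--     'Down': {'down', 'downarrow'},
--     'Left': {'left', 'leftarrow'},
--     'Right': {'right', 'rightarrow'},
--     'Print': {'printscreen', 'prtsc', 'prtscrn'},
--     'Insert': {'ins', 'insert'},
--     'Pause': {'pause', 'pausebreak'},
--     'ScrollLock': {'scrolllock', 'scroll'},
--     'CapsLock': {'capslock', 'caps'},
--     'NumLock': {'numlock', 'num'},
--     'Super_L': {'win', 'windows', 'super', 'meta', 'cmd', 'super_l', 'super_r'},
--     'ctrl': {'ctrl', 'control', 'ctrl_l', 'ctrl_r'},
--     'shift': {'shift', 'shift_l', 'shift_r'},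
--     'alt': {'alt', 'alt_l', 'alt_r', 'option'},
-- }
--
-- # Flat reverse table, built once at import time; the alias sets are pairwise
-- # disjoint, so a single lookup here gives the same canonical key as scanning
-- # every alias set in order.
-- ALIAS_TO_CANONICAL: Dict[str, str] = {
--     alias: canonical
--     for canonical, aliases in KEY_ALIASES.items()
--     for alias in aliases
-- }
--
-- def normalize_key_part(part: str) -> str:
--     low = part.lower()
--     hit = ALIAS_TO_CANONICAL.get(low)
--     if hit is not None:
--         return hit
--     if low.startswith('f') and low[1:].isdigit():
--         return f'F{int(low[1:])}'
--     return part
-- ===== Notes on version B (the rewrite author's own statement) =====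
-- stated objective: idiomatic
-- what changed: Replaces the per-call linear scan over KEY_ALIASES with a flat reverse dict ALIAS_TO_CANONICAL built once at import time, so the alias branch is a single hash lookup; the F-key branch is unchanged and the two identity returns collapse into one.
import Mathlib
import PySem

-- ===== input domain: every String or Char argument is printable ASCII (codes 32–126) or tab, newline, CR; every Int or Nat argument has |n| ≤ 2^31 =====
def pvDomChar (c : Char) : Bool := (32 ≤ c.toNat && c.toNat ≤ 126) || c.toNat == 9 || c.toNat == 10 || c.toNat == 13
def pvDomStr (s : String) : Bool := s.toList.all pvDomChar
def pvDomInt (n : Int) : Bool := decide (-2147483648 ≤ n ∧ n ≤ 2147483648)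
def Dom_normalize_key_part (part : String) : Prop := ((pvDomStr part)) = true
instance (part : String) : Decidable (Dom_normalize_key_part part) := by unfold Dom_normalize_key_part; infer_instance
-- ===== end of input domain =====

-- B builds a flat alias→canonical reverse table once so the alias branch is a single lookup
-- instead of A's per-call scan over the alias sets (objective: idiomatic).

-- ===== PORT A =====
def pvKeyAliases : PySem.Dict String (PySem.Set String) := PySem.Dict.ofList
  [("Escape", PySem.Set.ofList ["esc", "escape"]),
   ("Return", PySem.Set.ofList ["enter", "return"]),
   ("BackSpace", PySem.Set.ofList ["backspace", "bksp"]),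
   ("Delete", PySem.Set.ofList ["del", "delete"]),
   ("Tab", PySem.Set.ofList ["tab"]),
   ("space", PySem.Set.ofList ["space", "spacebar"]),
   ("Page_Up", PySem.Set.ofList ["pageup", "pgup"]),
   ("Page_Down", PySem.Set.ofList ["pagedown", "pgdn"]),
   ("Home", PySem.Set.ofList ["home"]),
   ("End", PySem.Set.ofList ["end"]),
   ("Up", PySem.Set.ofList ["up", "uparrow"]),
   ("Down", PySem.Set.ofList ["down", "downarrow"]),
   ("Left", PySem.Set.ofList ["left", "leftarrow"]),
   ("Right", PySem.Set.ofList ["right", "rightarrow"]),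
   ("Print", PySem.Set.ofList ["printscreen", "prtsc", "prtscrn"]),
   ("Insert", PySem.Set.ofList ["ins", "insert"]),
   ("Pause", PySem.Set.ofList ["pause", "pausebreak"]),
   ("ScrollLock", PySem.Set.ofList ["scrolllock", "scroll"]),
   ("CapsLock", PySem.Set.ofList ["capslock", "caps"]),
   ("NumLock", PySem.Set.ofList ["numlock", "num"]),
   ("Super_L", PySem.Set.ofList ["win", "windows", "super", "meta", "cmd", "super_l", "super_r"]),
   ("ctrl", PySem.Set.ofList ["ctrl", "control", "ctrl_l", "ctrl_r"]),
   ("shift", PySem.Set.ofList ["shift", "shift_l", "shift_r"]),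
   ("alt", PySem.Set.ofList ["alt", "alt_l", "alt_r", "option"])]

-- the 'for canonical, aliases in KEY_ALIASES.items(): if low in aliases: return canonical' loop
def pvFindCanonical (low : String) : List (String × PySem.Set String) → Option String
  | [] => none
  | (canonical, aliases) :: rest =>
    if low ∈ aliases then some canonical else pvFindCanonical low rest

def normalize_key_part (part : String) : String :=
  let low := PySem.Str.lower part
  match pvFindCanonical low pvKeyAliases.items with
  | some canonical => canonical
  | none =>
    if PySem.Str.startswith low "f" && PySem.Str.strIsdigit (PySem.Str.slice low (some 1) none) then
      -- strIsdigit guarantees int() succeeds, so getD 0 is never the default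
      "F" ++ PySem.Int.toStr ((PySem.Int.ofStr? (PySem.Str.slice low (some 1) none)).getD 0)
    else if PySem.Str.len part == 1 then part
    else part

-- ===== PORT B =====
-- module-level flat reverse table ALIAS_TO_CANONICAL (the dict comprehension, written out)
def pvAliasToCanonical : PySem.Dict String String := PySem.Dict.ofList
  [("esc", "Escape"),
   ("escape", "Escape"),
   ("enter", "Return"),
   ("return", "Return"),
   ("backspace", "BackSpace"),
   ("bksp", "BackSpace"),
   ("del", "Delete"),
   ("delete", "Delete"),
   ("tab", "Tab"),
   ("space", "space"),
   ("spacebar", "space"),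
   ("pageup", "Page_Up"),
   ("pgup", "Page_Up"),
   ("pagedown", "Page_Down"),
   ("pgdn", "Page_Down"),
   ("home", "Home"),
   ("end", "End"),
   ("up", "Up"),
   ("uparrow", "Up"),
   ("down", "Down"),
   ("downarrow", "Down"),
   ("left", "Left"),
   ("leftarrow", "Left"),
   ("right", "Right"),
   ("rightarrow", "Right"),
   ("printscreen", "Print"),
   ("prtsc", "Print"),
   ("prtscrn", "Print"),
   ("ins", "Insert"),
   ("insert", "Insert"),
   ("pause", "Pause"),
   ("pausebreak", "Pause"),
   ("scrolllock", "ScrollLock"),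
   ("scroll", "ScrollLock"),
   ("capslock", "CapsLock"),
   ("caps", "CapsLock"),
   ("numlock", "NumLock"),
   ("num", "NumLock"),
   ("win", "Super_L"),
   ("windows", "Super_L"),
   ("super", "Super_L"),
   ("meta", "Super_L"),
   ("cmd", "Super_L"),
   ("super_l", "Super_L"),
   ("super_r", "Super_L"),
   ("ctrl", "ctrl"),
   ("control", "ctrl"),
   ("ctrl_l", "ctrl"),
   ("ctrl_r", "ctrl"),
   ("shift", "shift"),
   ("shift_l", "shift"),
   ("shift_r", "shift"),
   ("alt", "alt"),
   ("alt_l", "alt"),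
   ("alt_r", "alt"),
   ("option", "alt")]

def normalize_key_part_alt (part : String) : String :=
  let low := PySem.Str.lower part
  match pvAliasToCanonical.get? low with
  | some hit => hit
  | none =>
    if PySem.Str.startswith low "f" && PySem.Str.strIsdigit (PySem.Str.slice low (some 1) none) then
      -- strIsdigit guarantees int() succeeds, so getD 0 is never the default
      "F" ++ PySem.Int.toStr ((PySem.Int.ofStr? (PySem.Str.slice low (some 1) none)).getD 0)
    else part

-- ===== PRECONDITION & SPEC =====
def Spec_normalize_key_part (part : String) (out : String) : Prop := out = normalize_key_part_alt part
instance (part : String) (out : String) : Decidable (Spec_normalize_key_part part out) := by unfold Spec_normalize_key_part; infer_instance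

-- ===== CLAIM (what is proved, stated in full; the proofs are below) =====
def Claim_equal_normalize_key_part : Prop := ∀ (part : String), Dom_normalize_key_part part → Spec_normalize_key_part part (normalize_key_part part)

-- ===== LEMMAS AND PROOFS =====

-- first-match scan over (canonical, aliases) pairs = first-match lookup in the flattened table
theorem pvFindCanonical_eq_flat (low : String) (L : List (String × PySem.Set String)) :
    pvFindCanonical low L =
      (PySem.Dict.mk (L.flatMap fun ca => ca.2.map fun a => (a, ca.1))).get? low := by
  induction L with
  | nil => simp [pvFindCanonical, PySem.Dict.get?]
  | cons hd tl ih =>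
    obtain ⟨c, as⟩ := hd
    simp only [pvFindCanonical, List.flatMap_cons]
    induction as with
    | nil => simpa using ih
    | cons a as' ih2 =>
      by_cases h : low = a
      · subst h
        simp [PySem.Dict.get?_mk_cons]
      · have hba : (a == low) = false := by simp [Ne.symm h]
        simp only [List.map_cons, List.cons_append, PySem.Dict.get?_mk_cons, hba,
          Bool.false_eq_true, if_false]
        simpa [List.mem_cons, h] using ih2

set_option maxRecDepth 40000 in
theorem pvDict_flat_eq : pvAliasToCanonical =
    PySem.Dict.mk (pvKeyAliases.items.flatMap fun ca => ca.2.map fun a => (a, ca.1)) := by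
  decide

set_option maxRecDepth 40000 in
theorem ports_agree (part : String) : normalize_key_part part = normalize_key_part_alt part := by
  unfold normalize_key_part normalize_key_part_alt
  simp only [pvFindCanonical_eq_flat, pvDict_flat_eq, ite_self]

-- ===== VERDICT (by name: the statement is the Claim_ definition above) =====
theorem normalize_key_part_spec : Claim_equal_normalize_key_part := by
  intro part _
  unfold Spec_normalize_key_part
  exact ports_agree part
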